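-- pv_equiv track=rewrite | github.com/Gildartslol/EIT-Master-Budapest-Security-Python-Projects | Information Security Managament/week_4_assigmentB.py | encrypt_with_mul2
-- ===== SOURCE A (Python) =====
-- def encrypt_with_mul2(text, key, mode):
--     # There is no need to do nothing special to reverse the algorithm, it is working correctly when decrypting
--     # an encrypted message. We left the mode parameter just for testing purposes. We check now if key is 1 or 0 to use
--     # the last raw character as key.
--     result = ''
--     first = ord(text[0])
--     first_encrypted = (first ^ key)
--     result = result + chr(first_encrypted)
--     key = key * 2
--     # We skip the first character
--     for i in range(1, len(text)):
--         ch_numeric = ord(text[i])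
--         new_key = key % 256
--         # if 1 or 0 we get last byte character, else key calculated modulus 256
--         if new_key == 0 | new_key == 1:
--             new_key = text[i - 1]
--         encrypted = ch_numeric ^ new_key
--         key = key * 2
--         result = result + chr(encrypted)
--     return result
-- ===== SOURCE B (Python) =====
-- def encrypt_with_mul2(text, key, mode):
--     # key*2**i % 256 == 0 for every i >= 8, so only the first 8 characters are
--     # actually transformed; the rest of the text is copied through unchanged.
--     head = [chr(ord(text[0]) ^ key)]
--     k = key
--     for ch in text[1:8]:
--         k *= 2
--         head.append(chr(ord(ch) ^ (k % 256)))
--     return ''.join(head) + text[8:]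
-- ===== Notes on version B (the rewrite author's own statement) =====
-- stated objective: faster
-- what changed: B exploits that key*2^i mod 256 vanishes for every i >= 8, so it XOR-transforms only the first 8 characters (keeping the key bounded) and copies text[8:] through verbatim, instead of A's unbounded big-int key doubling and quadratic string concatenation over the whole text.
import Mathlib
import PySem

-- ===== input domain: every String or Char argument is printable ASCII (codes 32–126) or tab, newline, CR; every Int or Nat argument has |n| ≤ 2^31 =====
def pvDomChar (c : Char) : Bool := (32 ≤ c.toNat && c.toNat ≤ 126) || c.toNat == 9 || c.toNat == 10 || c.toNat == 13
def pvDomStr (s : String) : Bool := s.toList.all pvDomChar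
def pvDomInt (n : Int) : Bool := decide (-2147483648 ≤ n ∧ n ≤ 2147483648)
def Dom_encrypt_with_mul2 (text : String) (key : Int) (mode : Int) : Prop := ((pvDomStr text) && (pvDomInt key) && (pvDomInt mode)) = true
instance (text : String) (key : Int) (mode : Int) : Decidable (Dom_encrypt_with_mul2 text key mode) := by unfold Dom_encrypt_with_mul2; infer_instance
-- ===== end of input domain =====

-- B XOR-transforms only the first 8 characters (key*2^i mod 256 = 0 for i ≥ 8) and copies the
-- rest verbatim, replacing A's unbounded key doubling and repeated string concatenation (objective: faster).


-- ===== PORT A =====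
-- chr(n); exact wherever Python's chr returns and the code point is a Lean Char
-- (Pre_ guarantees this for the first character; all later values are < 256)
def pvChr (n : Int) : Char := Char.ofNat n.toNat

-- one iteration of A's loop body; first component none = the TypeError branch
-- (Python's 'new_key == 0 | new_key == 1' chains to new_key == 1; then 'int ^ str' raises;
--  it is unreachable: the loop key is always even — proved below)
def pvStepA (st : Option (List Char) × Int) (c : Char) : Option (List Char) × Int :=
  match st with
  | (none, k) => (none, k)
  | (some res, k) =>
    let ch_numeric : Int := (c.toNat : Int)
    let new_key := PySem.Int.mod k 256
    if new_key = PySem.Int.bor 0 new_key ∧ new_key = 1 then (none, k * 2)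
    else (some (res ++ [pvChr (PySem.Int.bxor ch_numeric new_key)]), k * 2)

def encrypt_with_mul2 (text : String) (key : Int) (mode : Int) : String :=
  let cs := text.toList
  let first : Int := ((cs.headD ' ').toNat : Int)   -- ord(text[0]); Pre_ excludes empty text (IndexError)
  let st0 : Option (List Char) × Int := (some [pvChr (PySem.Int.bxor first key)], key * 2)
  let st := (PySem.List.pyRange 1 (cs.length : Int) 1).foldl
      (fun st i => pvStepA st (PySem.List.pyGetD cs i ' ')) st0
  String.ofList (st.1.getD [])   -- getD [] is never the none case (the TypeError branch is unreachable)

-- ===== PORT B =====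
-- one iteration of B's loop: k *= 2; append chr(ord(ch) ^ (k % 256))
def pvStepB (st : List Char × Int) (c : Char) : List Char × Int :=
  let k := st.2 * 2
  (st.1 ++ [pvChr (PySem.Int.bxor ((c.toNat : Int)) (PySem.Int.mod k 256))], k)

def encrypt_with_mul2_alt (text : String) (key : Int) (mode : Int) : String :=
  let cs := text.toList
  let head0 : List Char := [pvChr (PySem.Int.bxor ((cs.headD ' ').toNat : Int) key)]
  let st := (PySem.List.slice cs (some 1) (some 8)).foldl pvStepB (head0, key)
  String.ofList st.1 ++ String.ofList (PySem.List.slice cs (some 8) none)   -- ''.join(head) + text[8:]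

-- ===== PRECONDITION & SPEC =====
-- Pre_ excludes: empty text (IndexError) and key < 0 or first-char-XOR ≥ 0x110000 (chr raises
-- ValueError), and a first-char XOR in the surrogate range 0xD800–0xDFFF, where Python A returns a
-- lone-surrogate string that a Lean Char cannot represent.
def Pre_encrypt_with_mul2 (text : String) (key : Int) (mode : Int) : Prop :=
  text ≠ "" ∧ 0 ≤ key ∧
  (PySem.Int.bxor ((text.toList.headD ' ').toNat : Int) key < 0xD800 ∨
   (0xE000 ≤ PySem.Int.bxor ((text.toList.headD ' ').toNat : Int) key ∧
    PySem.Int.bxor ((text.toList.headD ' ').toNat : Int) key < 0x110000))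
instance (text : String) (key : Int) (mode : Int) : Decidable (Pre_encrypt_with_mul2 text key mode) := by
  unfold Pre_encrypt_with_mul2; infer_instance

def pvWitness_encrypt_with_mul2 : String × Int × Int := ("hello world", 77, 0)

def Spec_encrypt_with_mul2 (text : String) (key : Int) (mode : Int) (out : String) : Prop := out = encrypt_with_mul2_alt text key mode
instance (text : String) (key : Int) (mode : Int) (out : String) : Decidable (Spec_encrypt_with_mul2 text key mode out) := by unfold Spec_encrypt_with_mul2; infer_instance

-- ===== CLAIM (what is proved, stated in full; the proofs are below) =====
def Claim_equal_encrypt_with_mul2 : Prop := ∀ (text : String) (key : Int) (mode : Int), Dom_encrypt_with_mul2 text key mode → Pre_encrypt_with_mul2 text key mode → Spec_encrypt_with_mul2 text key mode (encrypt_with_mul2 text key mode)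

-- ===== LEMMAS AND PROOFS =====
-- the per-character stream both loops produce: state k, character i uses key k*2^(i+1) mod 256
def pvEncTail (k : Int) : List Char → List Char
  | [] => []
  | c :: t => pvChr (PySem.Int.bxor ((c.toNat : Int)) (PySem.Int.mod (k * 2) 256)) :: pvEncTail (k * 2) t

theorem pvMod_ne_one (k : Int) : PySem.Int.mod (k * 2) 256 ≠ 1 := by
  rw [PySem.Int.mod_eq_emod_of_pos (by norm_num)]
  omega

theorem pvFoldA (t : List Char) : ∀ (res : List Char) (k : Int),
    (t.foldl pvStepA (some res, k * 2)).1 = some (res ++ pvEncTail k t) := by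
  induction t with
  | nil => intro res k; simp [pvEncTail]
  | cons c t ih =>
    intro res k
    have hbranch : ¬ (PySem.Int.mod (k * 2) 256 = PySem.Int.bor 0 (PySem.Int.mod (k * 2) 256) ∧
        PySem.Int.mod (k * 2) 256 = 1) := fun h => pvMod_ne_one k h.2
    simp only [List.foldl_cons, pvStepA, if_neg hbranch]
    rw [show k * 2 * 2 = (k * 2) * 2 from rfl, ih]
    simp [pvEncTail]

theorem pvFoldB (t : List Char) : ∀ (res : List Char) (k : Int),
    (t.foldl pvStepB (res, k)).1 = res ++ pvEncTail k t := by
  induction t with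
  | nil => intro res k; simp [pvEncTail]
  | cons c t ih =>
    intro res k
    simp only [List.foldl_cons, pvStepB, ih]
    simp [pvEncTail]

theorem pvEncTail_append (t₁ : List Char) : ∀ (t₂ : List Char) (k : Int),
    pvEncTail k (t₁ ++ t₂) = pvEncTail k t₁ ++ pvEncTail (k * 2 ^ t₁.length) t₂ := by
  induction t₁ with
  | nil => intro t₂ k; simp [pvEncTail]
  | cons c t ih =>
    intro t₂ k
    have hk : k * 2 * 2 ^ t.length = k * 2 ^ (c :: t).length := by
      simp [List.length_cons, pow_succ]; ring
    simp only [List.cons_append, pvEncTail, ih, hk]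

theorem pvEncTail_id (t : List Char) : ∀ (k : Int), (128 : Int) ∣ k → pvEncTail k t = t := by
  induction t with
  | nil => intro k _; rfl
  | cons c t ih =>
    intro k hk
    obtain ⟨m, rfl⟩ := hk
    have hmod : PySem.Int.mod (128 * m * 2) 256 = 0 := by
      rw [PySem.Int.mod_eq_emod_of_pos (by norm_num)]
      omega
    simp only [pvEncTail, hmod, PySem.Int.bxor_zero, ih (128 * m * 2) ⟨m * 2, by ring⟩]
    simp [pvChr]

-- closed form shared by both ports
theorem pvA_closed (text : String) (key : Int) (mode : Int) :
    encrypt_with_mul2 text key mode =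
      String.ofList ([pvChr (PySem.Int.bxor ((text.toList.headD ' ').toNat : Int) key)] ++
        pvEncTail key (text.toList.drop 1)) := by
  simp only [encrypt_with_mul2]
  rw [PySem.List.foldl_pyRange_pyGetD' text.toList ' ' pvStepA _ (by norm_num : (0:Int) ≤ 1)]
  rw [show ((1:Int)).toNat = 1 from rfl, pvFoldA]
  rfl

theorem pvB_closed (text : String) (key : Int) (mode : Int) :
    encrypt_with_mul2_alt text key mode =
      String.ofList ([pvChr (PySem.Int.bxor ((text.toList.headD ' ').toNat : Int) key)] ++
        pvEncTail key ((text.toList.drop 1).take 7)) ++ String.ofList (text.toList.drop 8) := by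
  simp only [encrypt_with_mul2_alt]
  rw [PySem.List.slice_toNat text.toList (by norm_num) (by norm_num),
      PySem.List.slice_from text.toList (by norm_num : (0:Int) ≤ 8)]
  rw [show ((8:Int)).toNat = 8 from rfl, show ((1:Int)).toNat = 1 from rfl]
  rw [show (8 - 1 : Nat) = 7 from rfl]
  congr 1
  rw [pvFoldB]

theorem pvString_ofList_append (a b : List Char) : String.ofList a ++ String.ofList b = String.ofList (a ++ b) := by
  simp

theorem pvEncTail_split (t : List Char) (k : Int) :
    pvEncTail k t = pvEncTail k (t.take 7) ++ t.drop 7 := by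
  by_cases h : t.length ≤ 7
  · simp [List.take_of_length_le h, List.drop_of_length_le h]
  · have hdvd : (128 : Int) ∣ k * 2 ^ (t.take 7).length := by
      rw [List.length_take_of_le (by omega)]
      exact ⟨k, by ring⟩
    conv_lhs => rw [← List.take_append_drop 7 t]
    rw [pvEncTail_append, pvEncTail_id (t.drop 7) _ hdvd]

-- ===== VERDICT (by name: the statement is the Claim_ definition above) =====
theorem encrypt_with_mul2_spec : Claim_equal_encrypt_with_mul2 := by
  intro text key mode _ _
  unfold Spec_encrypt_with_mul2
  rw [pvA_closed, pvB_closed, pvString_ofList_append]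
  have hdrop : text.toList.drop 8 = (text.toList.drop 1).drop 7 := by
    rw [List.drop_drop]
  rw [hdrop]
  congr 1
  rw [List.append_assoc, ← pvEncTail_split]
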